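-- pv_equiv track=rewrite | github.com/ViktorOsa/leetcodeproblems | test/test2.py | bstDistance
-- ===== SOURCE A (Python) =====
-- class TreeNode:
--     def __init__(self, val = 0, left = None, right = None):
--         self.val = val
--         self.left = left
--         self.right = right
--
-- def bstDistance(num, values, node1, node2):
--
--     is_node1 = False
--     is_node2 = False
--
--     if node1 is None or node2 is None or num == 0:
--         return -1
--
--     # 1. Construct BST from array
--     root = None
--     for el in values:
--         root = insert_in_bst(root, el)
--         if el == node1:
--             is_node1 = True
--         if el == node2:
--             is_node2 = True
--
--     # 2. check if nodes are not in the values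
--     if not is_node1 or not is_node2 :
--         return -1
--
--     # 3. Find lowest common parent for node1 and node2
--     lcp = find_lowest_common_parent(root, node1, node2)
--
--     # 4. calculate height for both nodes
--     height1 = calculate_height(lcp, node1)
--     height2 = calculate_height(lcp, node2)
--
--     return height1 + height2
--
-- def calculate_height(root, node):
--
--     if root.val == node:
--         return 0
--
--     if node < root.val:
--         return calculate_height(root.left, node) + 1
--     else:
--         return calculate_height(root.right, node) + 1
--
-- def find_lowest_common_parent(root, node1, node2):
--
--     # recursive way to find lowest common parent
--
--     if root.val > node1 and root.val >node2:
--         root = find_lowest_common_parent(root.left, node1, node2)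
--     elif root.val < node1 and root.val < node2:
--         root = find_lowest_common_parent(root.right, node1, node2)
--
--     return root
--
-- def insert_in_bst(root, value):
--
--     if not root:
--         return TreeNode(val = value)
--
--     if value < root.val:
--         root.left = insert_in_bst(root.left, value)
--     else:
--         root.right = insert_in_bst(root.right, value)
--
--     return root
-- ===== SOURCE B (Python) =====
-- def bstDistance(num, values, node1, node2):
--     if node1 is None or node2 is None or num == 0:
--         return -1
--     if node1 not in values or node2 not in values:
--         return -1
--     a = min(node1, node2)
--     b = max(node1, node2)
--     d1 = _scan_depth(values, node1, node1)
--     d2 = _scan_depth(values, node2, node2)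
--     dl = _scan_depth(values, a, b)
--     return (d1 - dl) + (d2 - dl)
--
-- def _scan_depth(values, a, b):
--     # Depth, in the BST obtained by inserting `values` in order (duplicates to
--     # the right), of the first node on the search path whose value lies in
--     # [a, b]; computed by window-narrowing over the insertion order, no tree.
--     lo = None
--     hi = None
--     d = 0
--     for el in values:
--         if (lo is None or lo <= el) and (hi is None or el < hi):
--             if a <= el <= b:
--                 return d
--             if el < a:
--                 lo = el
--             else:
--                 hi = el
--             d += 1
--     return d  # unreachable when some element of values lies in [a, b]
-- ===== Notes on version B (the rewrite author's own statement) =====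
-- stated objective: faster
-- what changed: B never builds the BST: each of the three needed depths (node1, node2, and their LCA in the insertion-order BST) is computed by one linear window-narrowing scan over the insertion order, replacing A's recursive tree construction plus recursive LCA/height searches.
import Mathlib
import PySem

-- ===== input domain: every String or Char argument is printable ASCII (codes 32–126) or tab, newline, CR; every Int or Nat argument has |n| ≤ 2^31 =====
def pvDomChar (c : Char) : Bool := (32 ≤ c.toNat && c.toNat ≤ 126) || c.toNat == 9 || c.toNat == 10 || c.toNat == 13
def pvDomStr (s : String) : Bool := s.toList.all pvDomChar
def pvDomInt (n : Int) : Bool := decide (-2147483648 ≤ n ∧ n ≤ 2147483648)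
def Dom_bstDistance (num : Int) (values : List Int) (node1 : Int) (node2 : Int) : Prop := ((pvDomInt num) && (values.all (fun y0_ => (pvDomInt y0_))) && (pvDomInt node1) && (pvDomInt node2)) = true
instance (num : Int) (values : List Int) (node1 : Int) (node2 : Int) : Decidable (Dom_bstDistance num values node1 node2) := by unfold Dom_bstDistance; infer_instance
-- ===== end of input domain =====

-- B replaces A's BST construction + recursive LCA/height searches by three linear
-- window-narrowing scans over the insertion order (no tree is built).

-- ===== PORT A =====
inductive PTree : Type
  | nil : PTree
  | node : Int → PTree → PTree → PTree
deriving DecidableEq, Repr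

-- insert_in_bst (functional port: Python mutates and returns the root; only the
-- returned structure matters)
def insBST : PTree → Int → PTree
  | .nil, x => .node x .nil .nil
  | .node v l r, x => if x < v then .node v (insBST l x) r else .node v l (insBST r x)

-- calculate_height; the .nil case is unreachable when the value is in the tree
-- (Python would raise there; bstDistance's guards ensure it never does)
def calcHeight : PTree → Int → Int
  | .nil, _ => 0
  | .node v l r, n => if v == n then 0 else if n < v then calcHeight l n + 1 else calcHeight r n + 1

-- find_lowest_common_parent; the .nil case is unreachable for the same reason
def findLCP : PTree → Int → Int → PTree
  | .nil, _, _ => .nil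
  | .node v l r, n1, n2 =>
      if v > n1 ∧ v > n2 then findLCP l n1 n2
      else if v < n1 ∧ v < n2 then findLCP r n1 n2
      else .node v l r

-- A's 'node1 is None or node2 is None' tests are dropped: Int arguments are never None
def bstDistance (num : Int) (values : List Int) (node1 : Int) (node2 : Int) : Int :=
  if num == 0 then -1
  else
    let st := values.foldl
      (fun (s : PTree × Bool × Bool) el =>
        (insBST s.1 el, s.2.1 || (el == node1), s.2.2 || (el == node2)))
      (.nil, false, false)
    if !st.2.1 || !st.2.2 then -1
    else
      let lcp := findLCP st.1 node1 node2
      calcHeight lcp node1 + calcHeight lcp node2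

-- ===== PORT B =====
-- state of Source B's _scan_depth loop: (lo, hi, d), or the early-returned depth
def winB (lo hi : Option Int) (x : Int) : Bool :=
  (match lo with | none => true | some l => decide (l ≤ x))
  && (match hi with | none => true | some h => decide (x < h))

def scanStep (a b : Int) : ((Option Int × Option Int × Int) ⊕ Int) → Int → ((Option Int × Option Int × Int) ⊕ Int)
  | .inr d, _ => .inr d
  | .inl (lo, hi, d), el =>
      if winB lo hi el then
        if a ≤ el ∧ el ≤ b then .inr d
        else if el < a then .inl (some el, hi, d + 1)
        else .inl (lo, some el, d + 1)
      else .inl (lo, hi, d)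

-- _scan_depth: the trailing 'return d' (unreachable under bstDistance's guards)
-- is the .inl case
def scanDepth (values : List Int) (a b : Int) : Int :=
  match values.foldl (scanStep a b) (.inl (none, none, 0)) with
  | .inr d => d
  | .inl (_, _, d) => d

def bstDistance_alt (num : Int) (values : List Int) (node1 : Int) (node2 : Int) : Int :=
  if num == 0 then -1
  else if !(values.contains node1) || !(values.contains node2) then -1
  else
    let a := min node1 node2
    let b := max node1 node2
    let d1 := scanDepth values node1 node1
    let d2 := scanDepth values node2 node2
    let dl := scanDepth values a b
    (d1 - dl) + (d2 - dl)

-- ===== PRECONDITION & SPEC =====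
def Spec_bstDistance (num : Int) (values : List Int) (node1 : Int) (node2 : Int) (out : Int) : Prop := out = bstDistance_alt num values node1 node2
instance (num : Int) (values : List Int) (node1 : Int) (node2 : Int) (out : Int) : Decidable (Spec_bstDistance num values node1 node2 out) := by unfold Spec_bstDistance; infer_instance

-- ===== CLAIM (what is proved, stated in full; the proofs are below) =====
def Claim_equal_bstDistance : Prop := ∀ (num : Int) (values : List Int) (node1 : Int) (node2 : Int), Dom_bstDistance num values node1 node2 → Spec_bstDistance num values node1 node2 (bstDistance num values node1 node2)

-- ===== LEMMAS AND PROOFS =====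

-- the search/insertion window invariant of a BST built by insBST
def BSTIn (lo hi : Option Int) : PTree → Prop
  | .nil => True
  | .node u l r => winB lo hi u = true ∧ BSTIn lo (some u) l ∧ BSTIn (some u) hi r

-- ghost: the scan state reached by searching the tree for the interval [a,b]
def gfall (a b : Int) : PTree → Option Int × Option Int × Int → ((Option Int × Option Int × Int) ⊕ Int)
  | .nil, s => .inl s
  | .node u l r, (lo, hi, d) =>
      if a ≤ u ∧ u ≤ b then .inr d
      else if u < a then gfall a b r (some u, hi, d + 1)
      else gfall a b l (lo, some u, d + 1)

-- search depth of v in a tree, mirroring calcHeight but partial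
def searchD : PTree → Int → Option Int
  | .nil, _ => none
  | .node u l r, v =>
      if u == v then some 0
      else if v < u then (searchD l v).map (· + 1)
      else (searchD r v).map (· + 1)

theorem winB_some_le {lo hi : Option Int} {x : Int} (h : winB lo hi x = true) :
    (∀ l, lo = some l → l ≤ x) ∧ (∀ h', hi = some h' → x < h') := by
  unfold winB at h
  constructor
  · intro l hl; subst hl; simp at h; exact h.1
  · intro h' hh; subst hh; simp at h; exact h.2

theorem winB_of_bounds {lo hi : Option Int} {x : Int}
    (h1 : ∀ l, lo = some l → l ≤ x) (h2 : ∀ h', hi = some h' → x < h') :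
    winB lo hi x = true := by
  unfold winB
  cases lo with
  | none => cases hi with
    | none => simp
    | some h' => simp [h2 h' rfl]
  | some l => cases hi with
    | none => simp [h1 l rfl]
    | some h' => simp [h1 l rfl, h2 h' rfl]

theorem ins_BSTIn {lo hi : Option Int} {t : PTree} {x : Int}
    (ht : BSTIn lo hi t) (hx : winB lo hi x = true) : BSTIn lo hi (insBST t x) := by
  induction t generalizing lo hi with
  | nil => exact ⟨hx, trivial, trivial⟩
  | node u l r ihl ihr =>
    obtain ⟨hu, hl, hr⟩ := ht
    by_cases hc : x < u
    · have hx' : winB lo (some u) x = true :=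
        winB_of_bounds (fun z hz => (winB_some_le hx).1 z hz) (fun z hz => by cases hz; exact hc)
      simpa [insBST, hc, BSTIn] using (⟨hu, ihl hl hx', hr⟩ :
        winB lo hi u = true ∧ BSTIn lo (some u) (insBST l x) ∧ BSTIn (some u) hi r)
    · have hx' : winB (some u) hi x = true :=
        winB_of_bounds (fun z hz => by cases hz; omega) (fun z hz => (winB_some_le hx).2 z hz)
      simpa [insBST, hc, BSTIn] using (⟨hu, hl, ihr hr hx'⟩ :
        winB lo hi u = true ∧ BSTIn lo (some u) l ∧ BSTIn (some u) hi (insBST r x))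

theorem gfall_inl_win {a b : Int} {t : PTree} {lo hi : Option Int} {d : Int}
    {lo' hi' : Option Int} {d' : Int}
    (ht : BSTIn lo hi t) (hg : gfall a b t (lo, hi, d) = .inl (lo', hi', d'))
    {y : Int} (hy : winB lo' hi' y = true) : winB lo hi y = true := by
  induction t generalizing lo hi d with
  | nil =>
    simp [gfall] at hg
    obtain ⟨h1, h2, _⟩ := hg; subst h1; subst h2; exact hy
  | node u l r ihl ihr =>
    obtain ⟨hu, hl, hr⟩ := ht
    by_cases hs : a ≤ u ∧ u ≤ b
    · simp [gfall, hs] at hg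
    · by_cases hua : u < a
      · have := ihr hr (by simpa [gfall, hs, hua] using hg)
        refine winB_of_bounds ?_ ?_
        · intro z hz; have h1 := (winB_some_le this).1 u rfl
          have h2 := (winB_some_le hu).1 z hz; omega
        · intro z hz; exact (winB_some_le this).2 z hz
      · have := ihl hl (by simpa [gfall, hs, hua] using hg)
        refine winB_of_bounds ?_ ?_
        · intro z hz; exact (winB_some_le this).1 z hz
        · intro z hz; have h1 := (winB_some_le this).2 u rfl
          have h2 := (winB_some_le hu).2 z hz; omega

theorem step_ins {a b : Int} {t : PTree} {lo hi : Option Int} {d : Int} {x : Int}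
    (ht : BSTIn lo hi t) (hx : winB lo hi x = true) :
    scanStep a b (gfall a b t (lo, hi, d)) x = gfall a b (insBST t x) (lo, hi, d) := by
  induction t generalizing lo hi d with
  | nil =>
    by_cases hs : a ≤ x ∧ x ≤ b
    · simp [gfall, insBST, scanStep, hx, hs]
    · by_cases hxa : x < a
      · simp [gfall, insBST, scanStep, hx, hs, hxa]
      · simp [gfall, insBST, scanStep, hx, hs, hxa]
  | node u l r ihl ihr =>
    obtain ⟨hu, hl, hr⟩ := ht
    by_cases hs : a ≤ u ∧ u ≤ b
    · by_cases hxu : x < u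
      · simp [gfall, insBST, hs, hxu, scanStep]
      · simp [gfall, insBST, hs, hxu, scanStep]
    · by_cases hua : u < a
      -- tree search goes right
      · by_cases hxu : x < u
        · -- insertion goes left: right subtree untouched; step must be a no-op
          have e1 : gfall a b (PTree.node u l r) (lo, hi, d) = gfall a b r (some u, hi, d + 1) := by
            simp [gfall, hs, hua]
          have e2 : insBST (PTree.node u l r) x = PTree.node u (insBST l x) r := by
            simp [insBST, hxu]
          have e3 : gfall a b (PTree.node u (insBST l x) r) (lo, hi, d)
              = gfall a b r (some u, hi, d + 1) := by
            simp [gfall, hs, hua]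
          rw [e1, e2, e3]
          cases hg : gfall a b r (some u, hi, d + 1) with
          | inr d0 => simp [scanStep]
          | inl s0 =>
            obtain ⟨lo', hi', d'⟩ := s0
            have hwf : winB lo' hi' x = false := by
              by_contra hcon
              have hw := gfall_inl_win hr hg (y := x) (by simpa using hcon)
              have := (winB_some_le hw).1 u rfl; omega
            simp [scanStep, hwf]
        · -- insertion goes right too
          have hx' : winB (some u) hi x = true :=
            winB_of_bounds (fun z hz => by cases hz; omega)
              (fun z hz => (winB_some_le hx).2 z hz)
          have e1 : gfall a b (PTree.node u l r) (lo, hi, d) = gfall a b r (some u, hi, d + 1) := by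
            simp [gfall, hs, hua]
          have e2 : insBST (PTree.node u l r) x = PTree.node u l (insBST r x) := by
            simp [insBST, hxu]
          have e3 : gfall a b (PTree.node u l (insBST r x)) (lo, hi, d)
              = gfall a b (insBST r x) (some u, hi, d + 1) := by
            simp [gfall, hs, hua]
          rw [e1, e2, e3, ihr hr hx']
      · -- tree search goes left
        by_cases hxu : x < u
        · have hx' : winB lo (some u) x = true :=
            winB_of_bounds (fun z hz => (winB_some_le hx).1 z hz)
              (fun z hz => by cases hz; omega)
          have e1 : gfall a b (PTree.node u l r) (lo, hi, d) = gfall a b l (lo, some u, d + 1) := by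
            simp [gfall, hs, hua]
          have e2 : insBST (PTree.node u l r) x = PTree.node u (insBST l x) r := by
            simp [insBST, hxu]
          have e3 : gfall a b (PTree.node u (insBST l x) r) (lo, hi, d)
              = gfall a b (insBST l x) (lo, some u, d + 1) := by
            simp [gfall, hs, hua]
          rw [e1, e2, e3, ihl hl hx']
        · have e1 : gfall a b (PTree.node u l r) (lo, hi, d) = gfall a b l (lo, some u, d + 1) := by
            simp [gfall, hs, hua]
          have e2 : insBST (PTree.node u l r) x = PTree.node u l (insBST r x) := by
            simp [insBST, hxu]
          have e3 : gfall a b (PTree.node u l (insBST r x)) (lo, hi, d)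
              = gfall a b l (lo, some u, d + 1) := by
            simp [gfall, hs, hua]
          rw [e1, e2, e3]
          cases hg : gfall a b l (lo, some u, d + 1) with
          | inr d0 => simp [scanStep]
          | inl s0 =>
            obtain ⟨lo', hi', d'⟩ := s0
            have hwf : winB lo' hi' x = false := by
              by_contra hcon
              have hw := gfall_inl_win hl hg (y := x) (by simpa using hcon)
              have := (winB_some_le hw).2 u rfl; omega
            simp [scanStep, hwf]

theorem fold_gfall {a b : Int} (xs : List Int) {t : PTree} {lo hi : Option Int} {d : Int}
    (ht : BSTIn lo hi t) (hxs : ∀ x ∈ xs, winB lo hi x = true) :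
    xs.foldl (scanStep a b) (gfall a b t (lo, hi, d)) = gfall a b (xs.foldl insBST t) (lo, hi, d) := by
  induction xs generalizing t with
  | nil => rfl
  | cons x xs ih =>
    have hx := hxs x (by simp)
    simp only [List.foldl_cons, step_ins ht hx]
    exact ih (ins_BSTIn ht hx) (fun z hz => hxs z (by simp [hz]))

theorem searchD_ins {t : PTree} {v x : Int} {e : Int}
    (h : searchD t v = some e) : searchD (insBST t x) v = some e := by
  induction t generalizing e with
  | nil => simp [searchD] at h
  | node u l r ihl ihr =>
    by_cases huv : u = v
    · subst huv
      simp [searchD] at h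
      by_cases hxu : x < u <;> simp [insBST, hxu, searchD, ← h]
    · by_cases hvu : v < u
      · simp only [searchD, beq_iff_eq, huv, if_false, hvu, ite_true] at h
        rcases hml : searchD l v with _ | e0 <;> rw [hml] at h <;> simp at h
        by_cases hxu : x < u
        · simp [insBST, hxu, searchD, huv, hvu, ihl hml, ← h]
        · simp [insBST, hxu, searchD, huv, hvu, hml, ← h]
      · simp only [searchD, beq_iff_eq, huv, if_false, hvu, ite_false] at h
        rcases hmr : searchD r v with _ | e0 <;> rw [hmr] at h <;> simp at h
        by_cases hxu : x < u
        · simp [insBST, hxu, searchD, huv, hvu, hmr, ← h]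
        · simp [insBST, hxu, searchD, huv, hvu, ihr hmr, ← h]

theorem searchD_ins_self (t : PTree) (x : Int) : ∃ e, searchD (insBST t x) x = some e := by
  induction t with
  | nil => exact ⟨0, by simp [insBST, searchD]⟩
  | node u l r ihl ihr =>
    by_cases hxu : x < u
    · obtain ⟨e, he⟩ := ihl
      by_cases huv : u = x
      · exact ⟨0, by simp [insBST, hxu, searchD, huv]⟩
      · exact ⟨e + 1, by simp [insBST, hxu, searchD, huv, he]⟩
    · obtain ⟨e, he⟩ := ihr
      by_cases huv : u = x
      · exact ⟨0, by simp [insBST, hxu, searchD, huv]⟩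
      · exact ⟨e + 1, by simp [insBST, hxu, searchD, huv, he]⟩

theorem searchD_fold_pres {xs : List Int} {t : PTree} {v e : Int}
    (h : searchD t v = some e) : searchD (xs.foldl insBST t) v = some e := by
  induction xs generalizing t with
  | nil => exact h
  | cons y ys ih => exact ih (searchD_ins h)

theorem searchD_mem {xs : List Int} {x : Int} (hx : x ∈ xs) (t : PTree) :
    ∃ e, searchD (xs.foldl insBST t) x = some e := by
  induction xs generalizing t with
  | nil => cases hx
  | cons y ys ih =>
    simp only [List.foldl_cons]
    by_cases hxy : x ∈ ys
    · exact ih hxy (insBST t y)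
    · have hxe : x = y := by cases hx with | head => rfl | tail _ h => exact absurd h hxy
      subst hxe
      obtain ⟨e, he⟩ := searchD_ins_self t x
      exact ⟨e, searchD_fold_pres he⟩

theorem gfall_searchD {v : Int} {t : PTree} {e : Int} (h : searchD t v = some e)
    (lo hi : Option Int) (d : Int) : gfall v v t (lo, hi, d) = .inr (d + e) := by
  induction t generalizing lo hi d e with
  | nil => simp [searchD] at h
  | node u l r ihl ihr =>
    by_cases huv : u = v
    · subst huv
      simp [searchD] at h
      simp [gfall, ← h]
    · by_cases hvu : v < u
      · simp only [searchD, beq_iff_eq, huv, hvu, if_false, ite_true, Option.map_eq_some_iff] at h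
        obtain ⟨e0, he0, he⟩ := h
        have : ¬ (v ≤ u ∧ u ≤ v) := by omega
        have h2 : ¬ u < v := by omega
        rw [gfall, if_neg this, if_neg h2, ihl he0]
        congr 1; omega
      · simp only [searchD, beq_iff_eq, huv, hvu, if_false, ite_false, Option.map_eq_some_iff] at h
        obtain ⟨e0, he0, he⟩ := h
        have : ¬ (v ≤ u ∧ u ≤ v) := by omega
        have h2 : u < v := by omega
        rw [gfall, if_neg this, if_pos h2, ihr he0]
        congr 1; omega

theorem calcHeight_searchD {t : PTree} {v e : Int} (h : searchD t v = some e) :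
    calcHeight t v = e := by
  induction t generalizing e with
  | nil => simp [searchD] at h
  | node u l r ihl ihr =>
    by_cases huv : u = v
    · simp [searchD, huv] at h; simp [calcHeight, huv, ← h]
    · by_cases hvu : v < u
      · simp only [searchD, beq_iff_eq, huv, hvu, if_false, ite_true, Option.map_eq_some_iff] at h
        obtain ⟨e0, he0, he⟩ := h
        simp [calcHeight, huv, hvu, ihl he0, ← he]
      · simp only [searchD, beq_iff_eq, huv, hvu, if_false, ite_false, Option.map_eq_some_iff] at h
        obtain ⟨e0, he0, he⟩ := h
        simp [calcHeight, huv, hvu, ihr he0, ← he]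

theorem gfall_found {a b : Int} (hab : a ≤ b) {t : PTree} {e : Int}
    (h : searchD t a = some e) (lo hi : Option Int) (d : Int) :
    ∃ d', gfall a b t (lo, hi, d) = .inr d' := by
  induction t generalizing lo hi d e with
  | nil => simp [searchD] at h
  | node u l r ihl ihr =>
    by_cases hs : a ≤ u ∧ u ≤ b
    · exact ⟨d, by simp [gfall, hs]⟩
    · by_cases hua : u < a
      · have hau : ¬ u = a := by omega
        have : ¬ a < u := by omega
        simp only [searchD, beq_iff_eq, hau, this, if_false, ite_false, Option.map_eq_some_iff] at h
        obtain ⟨e0, he0, _⟩ := h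
        rw [gfall, if_neg hs, if_pos hua]
        exact ihr he0 _ _ _
      · have hub : u > b := by omega
        have hau : ¬ u = a := by omega
        have hal : a < u := by omega
        simp only [searchD, beq_iff_eq, hau, hal, if_false, ite_true, Option.map_eq_some_iff] at h
        obtain ⟨e0, he0, _⟩ := h
        rw [gfall, if_neg hs, if_neg hua]
        exact ihl he0 _ _ _

theorem hrel {n1 n2 : Int} {t : PTree} {lo hi : Option Int} {d d' e1 e2 : Int}
    (hg : gfall (min n1 n2) (max n1 n2) t (lo, hi, d) = .inr d')
    (h1 : searchD t n1 = some e1) (h2 : searchD t n2 = some e2) :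
    calcHeight (findLCP t n1 n2) n1 = e1 - (d' - d) ∧
    calcHeight (findLCP t n1 n2) n2 = e2 - (d' - d) := by
  induction t generalizing lo hi d d' e1 e2 with
  | nil => simp [searchD] at h1
  | node u l r ihl ihr =>
    by_cases hs : min n1 n2 ≤ u ∧ u ≤ max n1 n2
    · have hd : d' = d := by simpa [gfall, hs] using hg.symm
      have hlcp : findLCP (.node u l r) n1 n2 = .node u l r := by
        have c1 : ¬ (u > n1 ∧ u > n2) := by omega
        have c2 : ¬ (u < n1 ∧ u < n2) := by omega
        simp [findLCP, c1, c2]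
      rw [hlcp, hd, calcHeight_searchD h1, calcHeight_searchD h2]
      omega
    · by_cases hua : u < min n1 n2
      · have hg' : gfall (min n1 n2) (max n1 n2) r (some u, hi, d + 1) = .inr d' := by
          simp only [gfall] at hg
          rwa [if_neg hs, if_pos hua] at hg
        have c1 : ¬ (u > n1 ∧ u > n2) := by omega
        have c2 : u < n1 ∧ u < n2 := by omega
        have hlcp : findLCP (.node u l r) n1 n2 = findLCP r n1 n2 := by
          simp [findLCP, c1, c2]
        have hne1 : ¬ u = n1 := by omega
        have hlt1 : ¬ n1 < u := by omega
        simp only [searchD, beq_iff_eq, hne1, hlt1, if_false, ite_false, Option.map_eq_some_iff] at h1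
        obtain ⟨f1, hf1, hfe1⟩ := h1
        have hne2 : ¬ u = n2 := by omega
        have hlt2 : ¬ n2 < u := by omega
        simp only [searchD, beq_iff_eq, hne2, hlt2, if_false, ite_false, Option.map_eq_some_iff] at h2
        obtain ⟨f2, hf2, hfe2⟩ := h2
        obtain ⟨r1, r2⟩ := ihr hg' hf1 hf2
        rw [hlcp]; constructor <;> omega
      · have hub : u > max n1 n2 := by omega
        have hg' : gfall (min n1 n2) (max n1 n2) l (lo, some u, d + 1) = .inr d' := by
          simp only [gfall] at hg
          rwa [if_neg hs, if_neg hua] at hg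
        have c1 : u > n1 ∧ u > n2 := by omega
        have hlcp : findLCP (.node u l r) n1 n2 = findLCP l n1 n2 := by
          simp [findLCP, c1]
        have hne1 : ¬ u = n1 := by omega
        have hlt1 : n1 < u := by omega
        simp only [searchD, beq_iff_eq, hne1, hlt1, if_false, ite_true, Option.map_eq_some_iff] at h1
        obtain ⟨f1, hf1, hfe1⟩ := h1
        have hne2 : ¬ u = n2 := by omega
        have hlt2 : n2 < u := by omega
        simp only [searchD, beq_iff_eq, hne2, hlt2, if_false, ite_true, Option.map_eq_some_iff] at h2
        obtain ⟨f2, hf2, hfe2⟩ := h2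
        obtain ⟨r1, r2⟩ := ihl hg' hf1 hf2
        rw [hlcp]; constructor <;> omega

theorem fold_flags (n1 n2 : Int) (xs : List Int) (t : PTree) (f1 f2 : Bool) :
    xs.foldl (fun (s : PTree × Bool × Bool) el =>
        (insBST s.1 el, s.2.1 || (el == n1), s.2.2 || (el == n2))) (t, f1, f2)
      = (xs.foldl insBST t, f1 || xs.contains n1, f2 || xs.contains n2) := by
  induction xs generalizing t f1 f2 with
  | nil => simp
  | cons x xs ih =>
    simp only [List.foldl_cons, ih, List.contains_cons]
    have hc : ∀ y z : Int, (y == z) = (z == y) := by intro y z; by_cases h : y = z <;> simp [h, Ne.symm]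
    simp [Bool.or_assoc, hc]

theorem bstDistance_spec' (num : Int) (values : List Int) (node1 node2 : Int) :
    bstDistance num values node1 node2 = bstDistance_alt num values node1 node2 := by
  unfold bstDistance bstDistance_alt
  by_cases hnum : num == 0
  · simp [hnum]
  · simp only [hnum, if_false, Bool.false_eq_true]
    rw [fold_flags]
    by_cases hc1 : values.contains node1 = true
    · by_cases hc2 : values.contains node2 = true
      · simp only [hc1, hc2, Bool.not_true, Bool.or_self, Bool.false_or,
          Bool.false_eq_true, if_false]
        have hm1 : node1 ∈ values := by simpa using hc1
        have hm2 : node2 ∈ values := by simpa using hc2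
        obtain ⟨e1, he1⟩ := searchD_mem hm1 PTree.nil
        obtain ⟨e2, he2⟩ := searchD_mem hm2 PTree.nil
        have hwin : ∀ x ∈ values, winB none none x = true := fun x _ => rfl
        have hBst : BSTIn none none PTree.nil := trivial
        have hs1 : scanDepth values node1 node1 = e1 := by
          unfold scanDepth
          have h0 : (Sum.inl (none, none, 0) : (Option Int × Option Int × Int) ⊕ Int)
              = gfall node1 node1 PTree.nil (none, none, 0) := rfl
          rw [h0, fold_gfall values hBst hwin, gfall_searchD he1]
          simp
        have hs2 : scanDepth values node2 node2 = e2 := by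
          unfold scanDepth
          have h0 : (Sum.inl (none, none, 0) : (Option Int × Option Int × Int) ⊕ Int)
              = gfall node2 node2 PTree.nil (none, none, 0) := rfl
          rw [h0, fold_gfall values hBst hwin, gfall_searchD he2]
          simp
        have hea : ∃ ea, searchD (values.foldl insBST PTree.nil) (min node1 node2) = some ea := by
          rcases min_choice node1 node2 with h | h <;> rw [h]
          · exact ⟨e1, he1⟩
          · exact ⟨e2, he2⟩
        obtain ⟨ea, hminfound⟩ := hea
        obtain ⟨dl, hdl⟩ := gfall_found (min_le_max) hminfound none none 0
        have hsl : scanDepth values (min node1 node2) (max node1 node2) = dl := by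
          unfold scanDepth
          have h0 : (Sum.inl (none, none, 0) : (Option Int × Option Int × Int) ⊕ Int)
              = gfall (min node1 node2) (max node1 node2) PTree.nil (none, none, 0) := rfl
          rw [h0, fold_gfall values hBst hwin, hdl]
        obtain ⟨r1, r2⟩ := hrel hdl he1 he2
        simp only [hs1, hs2, hsl, r1, r2]
        omega
      · have h2 : node2 ∉ values := by simpa using hc2
        simp [h2]
    · have h1 : node1 ∉ values := by simpa using hc1
      simp [h1]

-- ===== VERDICT (by name: the statement is the Claim_ definition above) =====
theorem bstDistance_spec : Claim_equal_bstDistance := by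
  intro num values node1 node2 _
  exact bstDistance_spec' num values node1 node2
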